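-- pv_equiv track=rewrite | github.com/artem-yadr/testpoly_gen | polygen.py | edges_are_connected
-- ===== SOURCE A (Python) =====
-- from collections import defaultdict
--
-- def edges_are_connected(edges) -> bool:
--     d = defaultdict(set)
--     for (a, b) in edges:
--         assert a != b, "edge cannot start and end at same vertex"
--         d[a].add(b)
--         d[b].add(a)
--
--     if not all([len(v) == 2 for (_, v) in d.items()]):
--         return False
--
--     vertices_to_visit = set(d.keys())
--     vertices_visited = set()
--
--     # start somewhere
--     v = list(d.keys())[0]
--
--     while True:
--         vertices_visited.add(v)
--         a = d[v].pop()
--         b = d[v].pop()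
--         if a in vertices_visited and b in vertices_visited:
--             break
--         if not a in vertices_visited:
--             v = a
--         if not b in vertices_visited:
--             v = b
--
--     return vertices_to_visit == vertices_visited
-- ===== SOURCE B (Python) =====
-- def edges_are_connected(edges) -> bool:
--     adj = {}
--     for (a, b) in edges:
--         assert a != b, "edge cannot start and end at same vertex"
--         adj.setdefault(a, set()).add(b)
--         adj.setdefault(b, set()).add(a)
--
--     if any(len(ns) != 2 for ns in adj.values()):
--         return False
--
--     # level-by-level expansion from the first vertex: after len(adj) rounds,
--     # `reached` is the whole connected component of the start vertex
--     reached = {next(iter(adj))}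
--     for _ in range(len(adj)):
--         reached = reached | {u for v in reached for u in adj[v]}
--     return len(reached) == len(adj)
-- ===== Notes on version B (the rewrite author's own statement) =====
-- stated objective: alternative
-- what changed: The bespoke degree-2 cycle walk (pop both neighbours, hop to the unvisited one) is replaced by a generic connectivity test: repeated level-by-level expansion of a reached-set from the first vertex, compared by size with the vertex set; the adjacency build and degree-2 check stay.
import Mathlib
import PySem

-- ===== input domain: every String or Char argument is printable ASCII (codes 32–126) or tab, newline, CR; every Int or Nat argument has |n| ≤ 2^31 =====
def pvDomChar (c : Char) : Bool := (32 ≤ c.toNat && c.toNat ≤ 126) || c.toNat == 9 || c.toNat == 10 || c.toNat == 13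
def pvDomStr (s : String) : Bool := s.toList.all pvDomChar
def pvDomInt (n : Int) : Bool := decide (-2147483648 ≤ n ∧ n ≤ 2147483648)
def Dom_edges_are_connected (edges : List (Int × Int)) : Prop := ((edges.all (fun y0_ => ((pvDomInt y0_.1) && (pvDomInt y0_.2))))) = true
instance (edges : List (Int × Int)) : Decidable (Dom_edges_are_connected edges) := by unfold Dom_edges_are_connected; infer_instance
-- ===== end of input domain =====

-- B replaces A's bespoke degree-2 cycle walk by a generic level-by-level reached-set expansion
-- (same adjacency build and degree-2 check); equivalence of the RETURN value is proved on Pre_.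

-- ===== PORT A =====
-- the while-True cycle walk of A; fuel makes it total (the proof shows fuel is never exhausted
-- under Pre_ — each iteration visits a fresh vertex).  Python's set.pop order is unspecified
-- (hash order); the walk's RESULT does not depend on which of the two neighbours is popped
-- first (both are inspected symmetrically), so the port pops them in the stored order.
def pvWalkA (d : PySem.Dict Int (PySem.Set Int)) : Nat → PySem.Set Int → Int → PySem.Set Int
  | 0, visited, _ => visited
  | fuel+1, visited, v =>
    let visited1 := PySem.Set.add visited v                 -- vertices_visited.add(v)
    match d.getD v PySem.Set.empty with
    | a :: b :: _ =>                                        -- a = d[v].pop(); b = d[v].pop()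
      if visited1.contains a && visited1.contains b then visited1   -- break
      else
        let v1 := if !(visited1.contains a) then a else v   -- if not a in visited: v = a
        let v2 := if !(visited1.contains b) then b else v1  -- if not b in visited: v = b
        pvWalkA d fuel visited1 v2
    | _ => visited1  -- d[v].pop() with <2 elements raises KeyError; unreachable after the degree-2 check

def edges_are_connected (edges : List (Int × Int)) : Bool :=
  let d : PySem.Dict Int (PySem.Set Int) := edges.foldl (fun d p =>
      -- assert a != b (raises AssertionError on a self-loop: excluded by Pre_)
      let d := d.modify p.1 PySem.Set.empty (fun s => PySem.Set.add s p.2)   -- d[a].add(b)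
      d.modify p.2 PySem.Set.empty (fun s => PySem.Set.add s p.1)) PySem.Dict.empty  -- d[b].add(a)
  if !(d.items.all (fun p => PySem.Set.len p.2 == 2)) then false
  else
    let verticesToVisit : PySem.Set Int := PySem.Set.ofList d.keys
    match d.keys with
    | [] => false  -- list(d.keys())[0] on an empty dict raises IndexError: excluded by Pre_
    | v :: _ => PySem.Set.equal verticesToVisit (pvWalkA d (d.size + 1) PySem.Set.empty v)

-- ===== PORT B =====
-- reached | {u for v in reached for u in adj[v]}
def pvExpand (adj : PySem.Dict Int (PySem.Set Int)) (reached : PySem.Set Int) : PySem.Set Int :=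
  PySem.Set.union reached
    (reached.foldl (fun s v => PySem.Set.update s (adj.getD v PySem.Set.empty)) PySem.Set.empty)

def edges_are_connected_alt (edges : List (Int × Int)) : Bool :=
  let adj : PySem.Dict Int (PySem.Set Int) := edges.foldl (fun d p =>
      -- assert a != b (raises AssertionError on a self-loop: excluded by Pre_)
      let d := d.insert p.1 (PySem.Set.add (d.getD p.1 PySem.Set.empty) p.2)   -- adj.setdefault(a, set()).add(b)
      d.insert p.2 (PySem.Set.add (d.getD p.2 PySem.Set.empty) p.1)) PySem.Dict.empty
  if adj.values.any (fun ns => PySem.Set.len ns != 2) then false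
  else
    match adj.keys with
    | [] => false  -- next(iter(adj)) on an empty dict raises StopIteration: excluded by Pre_
    | k :: _ =>
      let reached := (List.range adj.size).foldl (fun r _ => pvExpand adj r) (PySem.Set.ofList [k])
      PySem.Set.len reached == (adj.size : Int)

-- ===== PRECONDITION & SPEC =====
-- Pre_ excludes exactly the inputs on which A raises: the empty edge list (IndexError on
-- list(d.keys())[0]) and any self-loop edge (AssertionError).
def Pre_edges_are_connected (edges : List (Int × Int)) : Prop :=
  edges ≠ [] ∧ ∀ p ∈ edges, p.1 ≠ p.2
instance (edges : List (Int × Int)) : Decidable (Pre_edges_are_connected edges) := by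
  unfold Pre_edges_are_connected; infer_instance
def pvWitness_edges_are_connected : (List (Int × Int)) := ([(0, 1), (1, 2), (2, 0)])
def Spec_edges_are_connected (edges : List (Int × Int)) (out : Bool) : Prop := out = edges_are_connected_alt edges
instance (edges : List (Int × Int)) (out : Bool) : Decidable (Spec_edges_are_connected edges out) := by unfold Spec_edges_are_connected; infer_instance

-- ===== CLAIM (what is proved, stated in full; the proofs are below) =====
def Claim_equal_edges_are_connected : Prop := ∀ (edges : List (Int × Int)), Dom_edges_are_connected edges → Pre_edges_are_connected edges → Spec_edges_are_connected edges (edges_are_connected edges)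

-- ===== LEMMAS AND PROOFS =====

-- the neighbour list of v in the adjacency dict
def pvNbrs (d : PySem.Dict Int (PySem.Set Int)) (v : Int) : List Int := d.getD v PySem.Set.empty

-- structural facts about the built adjacency dict
def pvGood (d : PySem.Dict Int (PySem.Set Int)) : Prop :=
  d.keys.Nodup ∧ (∀ v, (pvNbrs d v).Nodup) ∧ (∀ x y, x ∈ pvNbrs d y ↔ y ∈ pvNbrs d x) ∧
  (∀ x, x ∉ pvNbrs d x) ∧ (∀ v, v ∈ d.keys ↔ pvNbrs d v ≠ [])

def pvClosed (d : PySem.Dict Int (PySem.Set Int)) (C : List Int) : Prop :=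
  ∀ v ∈ C, ∀ u ∈ pvNbrs d v, u ∈ C

theorem pvGood_build (edges : List (Int × Int)) (h : ∀ p ∈ edges, p.1 ≠ p.2) :
    pvGood (edges.foldl (fun d p =>
      let d := d.insert p.1 (PySem.Set.add (d.getD p.1 PySem.Set.empty) p.2)
      d.insert p.2 (PySem.Set.add (d.getD p.2 PySem.Set.empty) p.1)) PySem.Dict.empty) := by
  have hstep : ∀ (d : PySem.Dict Int (PySem.Set Int)) (a b : Int), a ≠ b → pvGood d →
      pvGood ((d.insert a (PySem.Set.add (d.getD a PySem.Set.empty) b)).insert b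
        (PySem.Set.add ((d.insert a (PySem.Set.add (d.getD a PySem.Set.empty) b)).getD b PySem.Set.empty) a)) := by
    intro d a b hab hg
    obtain ⟨hk, hvnd, hsym, hirr, hkey⟩ := hg
    set d1 := d.insert a (PySem.Set.add (d.getD a PySem.Set.empty) b) with hd1
    set d2 := d1.insert b (PySem.Set.add (d1.getD b PySem.Set.empty) a) with hd2
    have hn1 : ∀ v, pvNbrs d1 v = if v = a then PySem.Set.add (pvNbrs d a) b else pvNbrs d v := by
      intro v; rw [pvNbrs, hd1, PySem.Dict.getD_insert]; rfl
    have hn2 : ∀ v, pvNbrs d2 v =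
        if v = b then PySem.Set.add (pvNbrs d b) a
        else if v = a then PySem.Set.add (pvNbrs d a) b else pvNbrs d v := by
      intro v
      rw [pvNbrs, hd2, PySem.Dict.getD_insert]
      have hb : d1.getD b PySem.Set.empty = pvNbrs d b := by
        rw [← pvNbrs, hn1 b, if_neg (Ne.symm hab)]
      rw [hb]
      by_cases hvb : v = b
      · simp [hvb]
      · rw [if_neg hvb, if_neg hvb, ← pvNbrs, hn1 v]
    have hmem : ∀ x y, x ∈ pvNbrs d2 y ↔
        x ∈ pvNbrs d y ∨ (y = a ∧ x = b) ∨ (y = b ∧ x = a) := by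
      intro x y
      rw [hn2 y]
      by_cases hyb : y = b
      · subst hyb
        simp [PySem.Set.mem_add, if_neg (Ne.symm hab), hab]
        tauto
      · by_cases hya : y = a
        · subst hya
          simp [if_neg hyb, PySem.Set.mem_add, hyb]
        · simp [if_neg hyb, if_neg hya, hya, hyb]
    have hkeys2 : ∀ v, v ∈ d2.keys ↔ v = b ∨ v = a ∨ v ∈ d.keys := by
      intro v
      rw [hd2, PySem.Dict.mem_keys_insert, hd1, PySem.Dict.mem_keys_insert]
    refine ⟨?_, ?_, ?_, ?_, ?_⟩
    · rw [hd2, hd1]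
      exact PySem.Dict.nodup_keys_insert _ _ _ (PySem.Dict.nodup_keys_insert _ _ _ hk)
    · intro v
      rw [hn2 v]
      split_ifs with h1 h2
      · exact PySem.Set.nodup_add _ _ (hvnd b)
      · exact PySem.Set.nodup_add _ _ (hvnd a)
      · exact hvnd v
    · intro x y
      rw [hmem x y, hmem y x, hsym x y]
      tauto
    · intro x
      rw [hmem x x]
      rintro (h | ⟨rfl, rfl⟩ | ⟨rfl, rfl⟩)
      · exact hirr x h
      · exact hab rfl
      · exact hab rfl
    · intro v
      rw [hkeys2 v, hn2 v]
      split_ifs with h1 h2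
      · simp only [h1, true_or, true_iff]
        exact List.ne_nil_of_mem ((PySem.Set.mem_add _ _ _).2 (Or.inr rfl))
      · simp only [h2, true_or, or_true, true_iff]
        exact List.ne_nil_of_mem ((PySem.Set.mem_add _ _ _).2 (Or.inr rfl))
      · simp only [h1, h2, false_or]
        exact hkey v
  have hbase : pvGood (PySem.Dict.empty : PySem.Dict Int (PySem.Set Int)) := by
    refine ⟨?_, ?_, ?_, ?_, ?_⟩ <;>
      simp [pvNbrs, PySem.Dict.keys, PySem.Dict.empty, PySem.Dict.getD, PySem.Dict.get?]
  suffices hgen : ∀ (es : List (Int × Int)) (d : PySem.Dict Int (PySem.Set Int)),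
      (∀ p ∈ es, p.1 ≠ p.2) → pvGood d →
      pvGood (es.foldl (fun d p =>
        let d := d.insert p.1 (PySem.Set.add (d.getD p.1 PySem.Set.empty) p.2)
        d.insert p.2 (PySem.Set.add (d.getD p.2 PySem.Set.empty) p.1)) d) by
    exact hgen edges _ h hbase
  intro es
  induction es with
  | nil => intro d _ hd; exact hd
  | cons p rest ih =>
    intro d hne hd
    exact ih _ (fun q hq => hne q (List.mem_cons_of_mem _ hq))
      (hstep d p.1 p.2 (hne p (List.mem_cons_self)) hd)


theorem pvDeg2 (d : PySem.Dict Int (PySem.Set Int)) (hnd : d.keys.Nodup)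
    (h : d.items.all (fun p => PySem.Set.len p.2 == 2) = true) :
    ∀ v ∈ d.keys, (pvNbrs d v).length = 2 := by
  intro v hv
  rcases List.mem_map.1 hv with ⟨p, hp, rfl⟩
  have h2 := List.all_eq_true.1 h p hp
  have h3 : d.getD p.1 PySem.Set.empty = p.2 :=
    PySem.Dict.getD_of_mem_items d (by exact hp) hnd PySem.Set.empty
  rw [pvNbrs, h3]
  simp only [PySem.Set.len, beq_iff_eq] at h2
  exact_mod_cast h2

theorem pvAnyNotAll (l : List (PySem.Set Int)) :
    (l.any fun ns => PySem.Set.len ns != 2) = !(l.all fun ns => PySem.Set.len ns == 2) := by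
  induction l with
  | nil => rfl
  | cons x xs ih => rw [List.any_cons, List.all_cons, ih]; simp [bne, Bool.not_and]

theorem pvValues_all (d : PySem.Dict Int (PySem.Set Int)) :
    (d.values.all fun ns => PySem.Set.len ns == 2) = (d.items.all fun p => PySem.Set.len p.2 == 2) := by
  simp [PySem.Dict.values, List.all_map, Function.comp_def]

-- membership in one expansion step
theorem pvMem_inner (adj : PySem.Dict Int (PySem.Set Int)) (r : List Int) (s0 : PySem.Set Int) (x : Int) :
    x ∈ r.foldl (fun s v => PySem.Set.update s (adj.getD v PySem.Set.empty)) s0 ↔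
      x ∈ s0 ∨ ∃ v ∈ r, x ∈ pvNbrs adj v := by
  induction r generalizing s0 with
  | nil => simp
  | cons a r ih =>
    rw [List.foldl_cons, ih]
    simp [PySem.Set.mem_update, pvNbrs, or_assoc]

theorem pvMem_expand (adj : PySem.Dict Int (PySem.Set Int)) (r : PySem.Set Int) (x : Int) :
    x ∈ pvExpand adj r ↔ x ∈ r ∨ ∃ v ∈ r, x ∈ pvNbrs adj v := by
  unfold pvExpand
  rw [PySem.Set.mem_union, pvMem_inner]
  simp

theorem pvExpand_append (adj : PySem.Dict Int (PySem.Set Int)) (r : PySem.Set Int) :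
    ∃ ex, pvExpand adj r = r ++ ex :=
  ⟨_, PySem.Set.update_eq_append_filter _ _⟩

theorem pvNodup_expand (adj : PySem.Dict Int (PySem.Set Int)) (r : PySem.Set Int)
    (h : r.Nodup) : (pvExpand adj r).Nodup :=
  PySem.Set.nodup_union _ _ h

-- the iterated expansion
def pvIter (adj : PySem.Dict Int (PySem.Set Int)) (n : Nat) (s : PySem.Set Int) : PySem.Set Int :=
  (List.range n).foldl (fun r _ => pvExpand adj r) s

theorem pvIter_succ (adj : PySem.Dict Int (PySem.Set Int)) (n : Nat) (s : PySem.Set Int) :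
    pvIter adj (n+1) s = pvExpand adj (pvIter adj n s) := by
  unfold pvIter; rw [List.range_succ, List.foldl_append]; rfl

theorem pvIter_mem (adj : PySem.Dict Int (PySem.Set Int)) (n : Nat) (s : PySem.Set Int) (x : Int)
    (h : x ∈ s) : x ∈ pvIter adj n s := by
  induction n with
  | zero => exact h
  | succ n ih => rw [pvIter_succ]; exact (pvMem_expand _ _ _).2 (Or.inl ih)

theorem pvIter_nodup (adj : PySem.Dict Int (PySem.Set Int)) (n : Nat) (s : PySem.Set Int)
    (h : s.Nodup) : (pvIter adj n s).Nodup := by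
  induction n with
  | zero => exact h
  | succ n ih => rw [pvIter_succ]; exact pvNodup_expand _ _ ih

-- a neighbour of any vertex is itself a key
theorem pvNbr_key (adj : PySem.Dict Int (PySem.Set Int)) (hg : pvGood adj) (v x : Int)
    (hxv : x ∈ pvNbrs adj v) : x ∈ adj.keys :=
  (hg.2.2.2.2 x).2 (List.ne_nil_of_mem ((hg.2.2.1 v x).2 hxv))

theorem pvIter_subset_keys (adj : PySem.Dict Int (PySem.Set Int)) (hg : pvGood adj)
    (n : Nat) (s : PySem.Set Int) (h : ∀ x ∈ s, x ∈ adj.keys) :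
    ∀ x ∈ pvIter adj n s, x ∈ adj.keys := by
  induction n with
  | zero => exact h
  | succ n ih =>
    rw [pvIter_succ]
    intro x hx
    rcases (pvMem_expand _ _ _).1 hx with hx | ⟨v, hv, hxv⟩
    · exact ih x hx
    · exact pvNbr_key adj hg v x hxv

theorem pvIter_subset_closed (adj : PySem.Dict Int (PySem.Set Int)) (C : List Int)
    (hC : pvClosed adj C) (n : Nat) (s : PySem.Set Int) (h : ∀ x ∈ s, x ∈ C) :
    ∀ x ∈ pvIter adj n s, x ∈ C := by
  induction n with
  | zero => exact h
  | succ n ih =>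
    rw [pvIter_succ]
    intro x hx
    rcases (pvMem_expand _ _ _).1 hx with hx | ⟨v, hv, hxv⟩
    · exact ih x hx
    · exact hC v (ih v hv) x hxv

-- after enough rounds the expansion is literally a fixpoint
theorem pvIter_fix (adj : PySem.Dict Int (PySem.Set Int)) (hg : pvGood adj) (m : Nat)
    (s : PySem.Set Int) (hnd : s.Nodup) (hsub : ∀ x ∈ s, x ∈ adj.keys) :
    pvExpand adj (pvIter adj m s) = pvIter adj m s ∨
      s.length + m ≤ (pvIter adj m s).length := by
  induction m with
  | zero => right; simp [pvIter]
  | succ m ih =>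
    rcases ih with hfix | hlen
    · left
      rw [pvIter_succ, hfix, hfix]
    · rcases pvExpand_append adj (pvIter adj m s) with ⟨ex, hex⟩
      rcases ex.eq_nil_or_concat' with rfl | ⟨_, _, _⟩
      · left
        rw [pvIter_succ, hex, List.append_nil, hex, List.append_nil]
      · right
        rw [pvIter_succ, hex, List.length_append]
        rename_i l a hl
        subst hl
        simp
        omega

theorem pvIter_closed (adj : PySem.Dict Int (PySem.Set Int)) (hg : pvGood adj)
    (s : PySem.Set Int) (hnd : s.Nodup) (hne : s ≠ []) (hsub : ∀ x ∈ s, x ∈ adj.keys) :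
    pvClosed adj (pvIter adj adj.size s) := by
  rcases pvIter_fix adj hg adj.size s hnd hsub with hfix | hlen
  · intro v hv u hu
    have : u ∈ pvExpand adj (pvIter adj adj.size s) :=
      (pvMem_expand _ _ _).2 (Or.inr ⟨v, hv, hu⟩)
    rwa [hfix] at this
  · exfalso
    have h1 : (pvIter adj adj.size s).length ≤ adj.keys.length :=
      ((pvIter_nodup adj adj.size s hnd).subperm
        (fun {x} hx => pvIter_subset_keys adj hg adj.size s hsub x hx)).length_le
    have h2 : adj.keys.length = adj.size := by
      simp [PySem.Dict.keys, PySem.Dict.size]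
    have h3 : 1 ≤ s.length := by
      cases s with
      | nil => exact absurd rfl hne
      | cons a l => simp
    omega

-- the walk invariant
def pvWInv (d : PySem.Dict Int (PySem.Set Int)) (k0 : Int) (V : PySem.Set Int) (v : Int) : Prop :=
  V.Nodup ∧ v ∉ V ∧ (∀ x ∈ V, x ∈ d.keys) ∧ v ∈ d.keys ∧ (k0 ∈ V ∨ v = k0) ∧
  (V = [] → v = k0) ∧ (V ≠ [] → ∃ u ∈ V, v ∈ pvNbrs d u) ∧
  (V ≠ [] → ∃ u, (u ∈ V ∨ u = v) ∧ u ∈ pvNbrs d k0) ∧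
  (∀ u ∈ V, u = k0 ∨ ∀ w ∈ pvNbrs d u, w ∈ V ∨ w = v)

-- main walk lemma: with enough fuel the walk returns a set W containing V∪{v}, inside the keys,
-- closed at every vertex except possibly k0, meeting the neighbours of k0, and contained in
-- every closed superset of V∪{v}
theorem pvWalk_main (d : PySem.Dict Int (PySem.Set Int)) (hg : pvGood d) (k0 : Int)
    (hdeg : ∀ v ∈ d.keys, (pvNbrs d v).length = 2)
    (C : List Int) (hC : pvClosed d C) :
    ∀ fuel (V : PySem.Set Int) (v : Int), pvWInv d k0 V v →
      d.keys.length ≤ fuel + V.length →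
      (∀ x ∈ V, x ∈ C) → v ∈ C →
      (∀ x, (x ∈ V ∨ x = v) → x ∈ pvWalkA d fuel V v) ∧
      (∀ x ∈ pvWalkA d fuel V v, x ∈ d.keys) ∧
      (pvWalkA d fuel V v).Nodup ∧
      k0 ∈ pvWalkA d fuel V v ∧
      (∃ u ∈ pvWalkA d fuel V v, u ∈ pvNbrs d k0) ∧
      (∀ u ∈ pvWalkA d fuel V v, u = k0 ∨ ∀ w ∈ pvNbrs d u, w ∈ pvWalkA d fuel V v) ∧
      (∀ x ∈ pvWalkA d fuel V v, x ∈ C) := by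
  intro fuel
  induction fuel with
  | zero =>
    intro V v hinv hlen _ _
    exfalso
    obtain ⟨hVnd, hvV, hVK, hvK, _⟩ := hinv
    have hsub : (v :: V) ⊆ d.keys := by
      intro x hx
      rcases List.mem_cons.1 hx with rfl | hx
      · exact hvK
      · exact hVK x hx
    have := (List.Nodup.subperm (by exact List.nodup_cons.2 ⟨hvV, hVnd⟩) hsub).length_le
    simp at this
    omega
  | succ fuel ih =>
    intro V v hinv hlen hVC hvC
    obtain ⟨hVnd, hvV, hVK, hvK, hk0, hVe, hprev, hnbk0, hcl⟩ := hinv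
    have hNv2 : (pvNbrs d v).length = 2 := hdeg v hvK
    rcases List.length_eq_two.1 hNv2 with ⟨a, b, hNv⟩
    have hNvnd : (pvNbrs d v).Nodup := hg.2.1 v
    have hab : a ≠ b := by
      rw [hNv] at hNvnd
      exact (List.pairwise_cons.1 hNvnd).1 b (List.mem_cons_self)
    have haNv : a ∈ pvNbrs d v := by rw [hNv]; simp
    have hbNv : b ∈ pvNbrs d v := by rw [hNv]; simp
    have hva : v ≠ a := fun h => hg.2.2.2.1 v (by rw [← h] at haNv; exact haNv)
    have hvb : v ≠ b := fun h => hg.2.2.2.1 v (by rw [← h] at hbNv; exact hbNv)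
    have haK : a ∈ d.keys := pvNbr_key d hg v a haNv
    have hbK : b ∈ d.keys := pvNbr_key d hg v b hbNv
    have hadd : PySem.Set.add V v = V ++ [v] := PySem.Set.add_of_not_mem hvV
    have hstep : pvWalkA d (fuel+1) V v =
        (if (PySem.Set.add V v).contains a && (PySem.Set.add V v).contains b then
          PySem.Set.add V v
        else
          pvWalkA d fuel (PySem.Set.add V v)
            (if !((PySem.Set.add V v).contains b) then b
             else if !((PySem.Set.add V v).contains a) then a else v)) := by
      show (let visited1 := PySem.Set.add V v
            match pvNbrs d v with
            | a :: b :: _ =>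
              if visited1.contains a && visited1.contains b then visited1
              else
                let v1 := if !(visited1.contains a) then a else v
                let v2 := if !(visited1.contains b) then b else v1
                pvWalkA d fuel visited1 v2
            | _ => visited1) = _
      rw [hNv]
    have hmemW1 : ∀ x : Int, x ∈ PySem.Set.add V v ↔ x ∈ V ∨ x = v := by
      intro x; rw [hadd]; simp
    have hW1nd : (PySem.Set.add V v).Nodup := by
      rw [hadd]
      simp [List.nodup_append, hVnd]
      exact fun x hx hxv => hvV (hxv ▸ hx)
    have hW1len : (PySem.Set.add V v).length = V.length + 1 := by rw [hadd]; simp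
    have hW1K : ∀ x ∈ PySem.Set.add V v, x ∈ d.keys := by
      intro x hx
      rcases (hmemW1 x).1 hx with h | rfl
      · exact hVK x h
      · exact hvK
    have hW1C : ∀ x ∈ PySem.Set.add V v, x ∈ C := by
      intro x hx
      rcases (hmemW1 x).1 hx with h | rfl
      · exact hVC x h
      · exact hvC
    have hW1ne : (PySem.Set.add V v) ≠ [] := by rw [hadd]; simp
    have hvW1 : v ∈ PySem.Set.add V v := (hmemW1 v).2 (Or.inr rfl)
    -- a common continuation for the two non-break cases: v2 is an unvisited neighbour of v
    have hcont : ∀ v2, v2 ∈ pvNbrs d v → v2 ∉ PySem.Set.add V v →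
        (v = k0 ∨ ∀ w ∈ pvNbrs d v, w ∈ PySem.Set.add V v ∨ w = v2) →
        (∀ x, (x ∈ V ∨ x = v) → x ∈ pvWalkA d fuel (PySem.Set.add V v) v2) ∧
        (∀ x ∈ pvWalkA d fuel (PySem.Set.add V v) v2, x ∈ d.keys) ∧
        (pvWalkA d fuel (PySem.Set.add V v) v2).Nodup ∧
        k0 ∈ pvWalkA d fuel (PySem.Set.add V v) v2 ∧
        (∃ u ∈ pvWalkA d fuel (PySem.Set.add V v) v2, u ∈ pvNbrs d k0) ∧
        (∀ u ∈ pvWalkA d fuel (PySem.Set.add V v) v2,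
          u = k0 ∨ ∀ w ∈ pvNbrs d u, w ∈ pvWalkA d fuel (PySem.Set.add V v) v2) ∧
        (∀ x ∈ pvWalkA d fuel (PySem.Set.add V v) v2, x ∈ C) := by
      intro v2 hv2N hv2W1 hvcl
      have hinv2 : pvWInv d k0 (PySem.Set.add V v) v2 := by
        refine ⟨hW1nd, hv2W1, hW1K, pvNbr_key d hg v v2 hv2N, ?_, ?_, ?_, ?_, ?_⟩
        · left
          rcases hk0 with h | h
          · exact (hmemW1 k0).2 (Or.inl h)
          · exact (hmemW1 k0).2 (Or.inr h.symm)
        · intro h; exact absurd h hW1ne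
        · intro _; exact ⟨v, hvW1, hv2N⟩
        · intro _
          rcases List.eq_nil_or_concat V with rfl | hVne'
          · have hvk0 : v = k0 := hVe rfl
            exact ⟨v2, Or.inr rfl, by rw [← hvk0]; exact hv2N⟩
          · have hVne : V ≠ [] := by rcases hVne' with ⟨_, _, rfl⟩; simp
            rcases hnbk0 hVne with ⟨u, hu, hk⟩
            exact ⟨u, Or.inl ((hmemW1 u).2 hu), hk⟩
        · intro u hu
          rcases (hmemW1 u).1 hu with huV | rfl
          · rcases hcl u huV with h | h
            · exact Or.inl h
            · right
              intro w hw
              rcases h w hw with h' | h'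
              · exact Or.inl ((hmemW1 w).2 (Or.inl h'))
              · exact Or.inl ((hmemW1 w).2 (Or.inr h'))
          · rcases hvcl with h | h
            · exact Or.inl h
            · exact Or.inr h
      have harith : d.keys.length ≤ fuel + (PySem.Set.add V v).length := by
        rw [hW1len]; omega
      have hv2C : v2 ∈ C := hC v hvC v2 hv2N
      obtain ⟨c1, c2, c3, c4, c5, c6, c7⟩ := ih (PySem.Set.add V v) v2 hinv2 harith hW1C hv2C
      refine ⟨?_, c2, c3, c4, c5, c6, c7⟩
      intro x hx
      exact c1 x (Or.inl ((hmemW1 x).2 hx))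
    rw [hstep]
    by_cases hbm : b ∈ PySem.Set.add V v
    · have hcb : (PySem.Set.add V v).contains b = true := (PySem.Set.contains_iff _ _).2 hbm
      by_cases ham : a ∈ PySem.Set.add V v
      · -- break: both neighbours already visited
        have hca : (PySem.Set.add V v).contains a = true := (PySem.Set.contains_iff _ _).2 ham
        rw [if_pos (by rw [hca, hcb]; rfl)]
        have hVne : V ≠ [] := by
          rintro rfl
          rcases (hmemW1 a).1 ham with h | h
          · exact List.not_mem_nil h
          · exact hva h.symm
        refine ⟨?_, hW1K, hW1nd, ?_, ?_, ?_, hW1C⟩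
        · intro x hx; exact (hmemW1 x).2 hx
        · rcases hk0 with h | h
          · exact (hmemW1 k0).2 (Or.inl h)
          · exact (hmemW1 k0).2 (Or.inr h.symm)
        · rcases hnbk0 hVne with ⟨u, hu, hk⟩
          exact ⟨u, (hmemW1 u).2 hu, hk⟩
        · intro u hu
          rcases (hmemW1 u).1 hu with huV | rfl
          · rcases hcl u huV with h | h
            · exact Or.inl h
            · right
              intro w hw
              rcases h w hw with h' | h'
              · exact (hmemW1 w).2 (Or.inl h')
              · exact (hmemW1 w).2 (Or.inr h')
          · right
            intro w hw
            rw [hNv] at hw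
            rcases List.mem_cons.1 hw with rfl | hw
            · exact ham
            · rcases List.mem_cons.1 hw with rfl | hw
              · exact hbm
              · exact absurd hw List.not_mem_nil
      · -- a unvisited, b visited: v = a next
        have hca : (PySem.Set.add V v).contains a = false := by
          cases hq : (PySem.Set.add V v).contains a
          · rfl
          · exact absurd ((PySem.Set.contains_iff _ _).1 hq) ham
        rw [if_neg (by rw [hca]; simp), hcb, hca]
        simp only [Bool.not_true, Bool.not_false, if_true]
        refine hcont a haNv ham (Or.inr ?_)
        intro w hw
        rw [hNv] at hw
        rcases List.mem_cons.1 hw with rfl | hw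
        · exact Or.inr rfl
        · rcases List.mem_cons.1 hw with rfl | hw
          · exact Or.inl hbm
          · exact absurd hw List.not_mem_nil
    · -- b unvisited: v = b next
      have hcb : (PySem.Set.add V v).contains b = false := by
        cases hq : (PySem.Set.add V v).contains b
        · rfl
        · exact absurd ((PySem.Set.contains_iff _ _).1 hq) hbm
      rw [if_neg (by rw [hcb]; simp), hcb]
      simp only [Bool.not_false, if_true]
      by_cases ham : a ∈ PySem.Set.add V v
      · refine hcont b hbNv hbm (Or.inr ?_)
        intro w hw
        rw [hNv] at hw
        rcases List.mem_cons.1 hw with rfl | hw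
        · exact Or.inl ham
        · rcases List.mem_cons.1 hw with rfl | hw
          · exact Or.inr rfl
          · exact absurd hw List.not_mem_nil
      · -- both neighbours unvisited: only possible at the start vertex
        refine hcont b hbNv hbm ?_
        rcases List.eq_nil_or_concat V with rfl | hVne'
        · exact Or.inl (hVe rfl)
        · exfalso
          have hVne : V ≠ [] := by rcases hVne' with ⟨_, _, rfl⟩; simp
          rcases hprev hVne with ⟨u0, hu0V, hvNu0⟩
          have hu0Nv : u0 ∈ pvNbrs d v := (hg.2.2.1 v u0).1 hvNu0
          rw [hNv] at hu0Nv
          rcases List.mem_cons.1 hu0Nv with rfl | hu0Nv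
          · exact ham ((hmemW1 u0).2 (Or.inl hu0V))
          · rcases List.mem_cons.1 hu0Nv with rfl | hu0Nv
            · exact hbm ((hmemW1 u0).2 (Or.inl hu0V))
            · exact absurd hu0Nv List.not_mem_nil

-- the parity argument: a set W ⊆ keys, closed except possibly at k0 but meeting k0's
-- neighbourhood, is in fact closed (in a graph where every key has exactly two neighbours)
theorem pvParity (d : PySem.Dict Int (PySem.Set Int)) (hg : pvGood d)
    (hdeg : ∀ v ∈ d.keys, (pvNbrs d v).length = 2) (k0 : Int) (W : List Int)
    (hWnd : W.Nodup) (hWK : ∀ x ∈ W, x ∈ d.keys) (hk0 : k0 ∈ W)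
    (hnb : ∃ u ∈ W, u ∈ pvNbrs d k0)
    (hcl : ∀ u ∈ W, u = k0 ∨ ∀ w ∈ pvNbrs d u, w ∈ W) :
    pvClosed d W := by
  intro v hvW u huN
  by_contra ha0W
  rcases hcl v hvW with rfl | h
  case inr => exact ha0W (h u huN)
  -- v = k0: u is a neighbour of k0 outside W; derive a contradiction by a handshake count
  have ha0K : u ∈ d.keys := pvNbr_key d hg v u huN
  have hk0Na0 : v ∈ pvNbrs d u := (hg.2.2.1 v u).2 huN
  obtain ⟨unb, hunbW, hunbN⟩ := hnb
  have hunbne : unb ≠ u := fun hh => ha0W (hh ▸ hunbW)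
  have hcard2 : ∀ x ∈ d.keys, ((pvNbrs d x).toFinset).card = 2 := by
    intro x hx
    rw [List.toFinset_card_of_nodup (hg.2.1 x)]
    exact hdeg x hx
  set WF := W.toFinset with hWFdef
  -- per-vertex: each visited vertex has exactly two neighbours, all in W except
  -- possibly u (and u is a neighbour only of v = k0 and of the second witness)
  have hterm : ∀ w ∈ WF,
      (WF.filter (fun y => y ∈ pvNbrs d w)).card + (if u ∈ pvNbrs d w then 1 else 0) = 2 := by
    intro w hwWF
    have hwW : w ∈ W := List.mem_toFinset.1 hwWF
    rcases hcl w hwW with rfl | hsub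
    · have hNk0 : (pvNbrs d w).toFinset = {unb, u} := by
        refine (Finset.eq_of_subset_of_card_le ?_ ?_).symm
        · intro x hx
          rcases Finset.mem_insert.1 hx with rfl | hx
          · exact List.mem_toFinset.2 hunbN
          · rw [Finset.mem_singleton] at hx
            subst hx
            exact List.mem_toFinset.2 huN
        · rw [hcard2 w (hWK w hwW), Finset.card_insert_of_notMem (by simpa using hunbne),
            Finset.card_singleton]
      have hfil : WF.filter (fun y => y ∈ pvNbrs d w) = {unb} := by
        ext y
        simp only [Finset.mem_filter, Finset.mem_singleton]
        constructor
        · rintro ⟨hyW, hyN⟩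
          have : y ∈ ({unb, u} : Finset Int) := hNk0 ▸ List.mem_toFinset.2 hyN
          rcases Finset.mem_insert.1 this with rfl | hy
          · rfl
          · rw [Finset.mem_singleton] at hy
            subst hy
            exact absurd (List.mem_toFinset.1 hyW) ha0W
        · rintro rfl
          exact ⟨List.mem_toFinset.2 hunbW, hunbN⟩
      rw [hfil, if_pos huN, Finset.card_singleton]
    · have hfil : WF.filter (fun y => y ∈ pvNbrs d w) = (pvNbrs d w).toFinset := by
        ext y
        simp only [Finset.mem_filter, List.mem_toFinset]
        exact ⟨fun hy => hy.2, fun hy => ⟨List.mem_toFinset.2 (hsub y hy), hy⟩⟩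
      rw [hfil, hcard2 w (hWK w hwW), if_neg (fun hu => ha0W (hsub u hu))]
  -- the handshake sum is even
  have hS : ((∑ w ∈ WF, (WF.filter (fun y => y ∈ pvNbrs d w)).card : ℕ) : ZMod 2) = 0 := by
    push_cast
    have h1 : ∀ w ∈ WF, ((WF.filter (fun y => y ∈ pvNbrs d w)).card : ZMod 2)
        = ∑ y ∈ WF, (if y ∈ pvNbrs d w then (1 : ZMod 2) else 0) := by
      intro w _
      rw [Finset.card_filter]
      push_cast
      exact Finset.sum_congr rfl (fun y _ => by split_ifs <;> simp)
    rw [Finset.sum_congr rfl h1, ← Finset.sum_product']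
    apply Finset.sum_involution (fun p _ => (p.2, p.1))
    · intro p hp
      by_cases hmem : p.2 ∈ pvNbrs d p.1
      · have h2 : p.1 ∈ pvNbrs d p.2 := (hg.2.2.1 p.1 p.2).2 hmem
        rw [if_pos hmem, if_pos h2]
        decide
      · have h2 : p.1 ∉ pvNbrs d p.2 := fun hh => hmem ((hg.2.2.1 p.1 p.2).1 hh)
        rw [if_neg hmem, if_neg h2]
        decide
    · intro p hp hne heq
      have h2 : p.2 = p.1 := congrArg Prod.fst heq
      by_cases hmem : p.2 ∈ pvNbrs d p.1
      · rw [h2] at hmem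
        exact hg.2.2.2.1 p.1 hmem
      · rw [if_neg hmem] at hne
        exact hne rfl
    · intro p hp
      rw [Finset.mem_product] at hp ⊢
      exact ⟨hp.2, hp.1⟩
    · intro p hp
      rfl
  -- sum the per-vertex identity
  set t := (WF.filter (fun w => u ∈ pvNbrs d w)).card with htdef
  have htot : (∑ w ∈ WF, (WF.filter (fun y => y ∈ pvNbrs d w)).card) + t = 2 * WF.card := by
    have h1 : ∑ w ∈ WF, ((WF.filter (fun y => y ∈ pvNbrs d w)).card +
        (if u ∈ pvNbrs d w then 1 else 0)) = 2 * WF.card := by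
      rw [Finset.sum_congr rfl hterm]
      simp [Finset.sum_const, mul_comm]
    rw [Finset.sum_add_distrib] at h1
    rw [← h1, htdef, Finset.card_filter]
  have ht2 : (t : ZMod 2) = 0 := by
    have hcast : ((∑ w ∈ WF, (WF.filter (fun y => y ∈ pvNbrs d w)).card : ℕ) : ZMod 2) +
        (t : ZMod 2) = ((2 * WF.card : ℕ) : ZMod 2) := by
      rw [← Nat.cast_add, htot]
    rw [hS, zero_add] at hcast
    rw [hcast, Nat.cast_mul]
    have h2z : ((2 : ℕ) : ZMod 2) = 0 := by decide
    rw [h2z, zero_mul]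
  have htsym : WF.filter (fun w => u ∈ pvNbrs d w) = WF.filter (fun w => w ∈ pvNbrs d u) := by
    apply Finset.filter_congr
    intro w _
    exact (hg.2.2.1 u w)
  have hsubf : WF.filter (fun w => w ∈ pvNbrs d u) ⊆ (pvNbrs d u).toFinset := by
    intro x hx
    exact List.mem_toFinset.2 (Finset.mem_filter.1 hx).2
  have htle : t ≤ 2 := by
    rw [htdef, htsym]
    calc (WF.filter (fun w => w ∈ pvNbrs d u)).card ≤ ((pvNbrs d u).toFinset).card :=
          Finset.card_le_card hsubf
      _ = 2 := hcard2 u ha0K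
  have htge : 1 ≤ t := by
    rw [htdef]
    refine Finset.card_pos.2 ⟨v, ?_⟩
    exact Finset.mem_filter.2 ⟨List.mem_toFinset.2 hvW, huN⟩
  have ht : t = 2 := by
    have h12 : t = 1 ∨ t = 2 := by omega
    rcases h12 with h1 | h2
    · rw [h1] at ht2
      exact absurd ht2 (by decide)
    · exact h2
  have hNa0W : (pvNbrs d u).toFinset ⊆ WF := by
    have heq : WF.filter (fun w => w ∈ pvNbrs d u) = (pvNbrs d u).toFinset := by
      apply Finset.eq_of_subset_of_card_le hsubf
      rw [hcard2 u ha0K, ← htsym, ← htdef, ht]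
    rw [← heq]
    exact Finset.filter_subset _ _
  obtain ⟨c, hcN, hck0⟩ : ∃ c ∈ (pvNbrs d u).toFinset, c ≠ v := by
    by_contra hall
    push_neg at hall
    have hsub1 : (pvNbrs d u).toFinset ⊆ {v} := fun x hx => Finset.mem_singleton.2 (hall x hx)
    have hle := Finset.card_le_card hsub1
    rw [hcard2 u ha0K, Finset.card_singleton] at hle
    omega
  have hcW : c ∈ W := List.mem_toFinset.1 (hNa0W hcN)
  rcases hcl c hcW with rfl | hsubc
  · exact hck0 rfl
  · exact ha0W (hsubc u ((hg.2.2.1 u c).2 (List.mem_toFinset.1 hcN)))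

-- the shared core: on any well-formed adjacency dict the two tail computations agree
theorem pvCore (d : PySem.Dict Int (PySem.Set Int)) (hg : pvGood d) :
    (if !(d.items.all (fun p => PySem.Set.len p.2 == 2)) then false
     else match d.keys with
       | [] => false
       | v :: _ => PySem.Set.equal (PySem.Set.ofList d.keys)
           (pvWalkA d (d.size + 1) PySem.Set.empty v))
    =
    (if d.values.any (fun ns => PySem.Set.len ns != 2) then false
     else match d.keys with
       | [] => false
       | k :: _ => PySem.Set.len
           ((List.range d.size).foldl (fun r _ => pvExpand d r) (PySem.Set.ofList [k]))
           == (d.size : Int)) := by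
  rw [pvAnyNotAll, pvValues_all]
  by_cases hall : (d.items.all (fun p => PySem.Set.len p.2 == 2)) = true
  · rw [hall]
    simp only [Bool.not_true, Bool.false_eq_true, if_false]
    rcases hkeys : d.keys with _ | ⟨k, rest⟩
    · rfl
    · have hdeg : ∀ v ∈ d.keys, (pvNbrs d v).length = 2 := pvDeg2 d hg.1 hall
      have hkK : k ∈ d.keys := by rw [hkeys]; exact List.mem_cons_self
      have hsizeK : d.keys.length = d.size := by simp [PySem.Dict.keys, PySem.Dict.size]
      show (PySem.Set.ofList (k :: rest)).equal (pvWalkA d (d.size + 1) PySem.Set.empty k)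
          = (PySem.Set.len (pvIter d d.size (PySem.Set.ofList [k])) == (d.size : Int))
      have hsing : PySem.Set.ofList [k] = [k] := rfl
      rw [hsing]
      have hsubk : ∀ x ∈ [k], x ∈ d.keys := by
        intro x hx
        rw [List.mem_singleton] at hx
        exact hx ▸ hkK
      have hRclosed : pvClosed d (pvIter d d.size [k]) :=
        pvIter_closed d hg [k] (List.nodup_singleton k) (by simp) hsubk
      have hkR : k ∈ pvIter d d.size [k] := pvIter_mem d d.size [k] k (List.mem_singleton_self k)
      have hRK := pvIter_subset_keys d hg d.size [k] hsubk
      have hRnd := pvIter_nodup d d.size [k] (List.nodup_singleton k)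
      have hinv0 : pvWInv d k PySem.Set.empty k :=
        ⟨List.nodup_nil, List.not_mem_nil, fun x hx => absurd hx List.not_mem_nil, hkK,
          Or.inr rfl, fun _ => rfl, fun h => absurd rfl h, fun h => absurd rfl h,
          fun x hx => absurd hx List.not_mem_nil⟩
      obtain ⟨c1, c2, c3, c4, c5, c6, c7⟩ :=
        pvWalk_main d hg k hdeg (pvIter d d.size [k]) hRclosed (d.size + 1)
          PySem.Set.empty k hinv0 (by simp [← hsizeK])
          (fun x hx => absurd hx List.not_mem_nil) hkR
      set W := pvWalkA d (d.size + 1) PySem.Set.empty k with hWdef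
      have hWclosed : pvClosed d W := pvParity d hg hdeg k W c3 c2 c4 c5 c6
      have hRW : ∀ x ∈ pvIter d d.size [k], x ∈ W :=
        pvIter_subset_closed d W hWclosed d.size [k]
          (fun x hx => by rw [List.mem_singleton] at hx; exact hx ▸ c1 k (Or.inr rfl))
      rw [Bool.eq_iff_iff]
      rw [PySem.Set.equal_iff, beq_iff_eq]
      have hknd : (k :: rest).Nodup := hkeys ▸ hg.1
      rw [PySem.Set.ofList_eq_self_of_nodup _ hknd, ← hkeys]
      constructor
      · intro hiff
        have hperm : (pvIter d d.size [k]).Perm d.keys := by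
          rw [List.perm_ext_iff_of_nodup hRnd hg.1]
          intro x
          exact ⟨fun hx => hRK x hx, fun hx => c7 x ((hiff x).1 hx)⟩
        rw [PySem.Set.len, hperm.length_eq, hsizeK]
      · intro hlen
        have hperm : (pvIter d d.size [k]).Perm d.keys := by
          apply (hRnd.subperm (fun {x} hx => hRK x hx)).perm_of_length_le
          rw [PySem.Set.len] at hlen
          have : (pvIter d d.size [k]).length = d.size := by exact_mod_cast hlen
          omega
        intro x
        constructor
        · intro hx
          exact hRW x (hperm.mem_iff.2 hx)
        · intro hx
          exact c2 x hx
  · rw [Bool.not_eq_true] at hall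
    rw [hall]
    simp only [Bool.not_false, if_true]

-- ===== VERDICT (by name: the statement is the Claim_ definition above) =====
theorem edges_are_connected_spec : Claim_equal_edges_are_connected := by
  intro edges _hdom hpre
  unfold Spec_edges_are_connected
  exact pvCore _ (pvGood_build edges hpre.2)
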